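-- pv_equiv track=rewrite | github.com/Lolfaceftw/card-framework | benchmark/mrcr.py | resolve_bin
-- ===== SOURCE A (Python) =====
-- BIN_BOUNDARIES = [
--     4096,
--     8192,
--     16384,
--     32768,
--     65536,
--     131072,
--     262144,
--     524288,
--     1048576,
-- ]
--
-- def resolve_bin(token_count: int) -> str:
--     prev = 0
--     for boundary in BIN_BOUNDARIES:
--         if token_count <= boundary:
--             if prev == 0:
--                 return f"(0, {boundary}]"
--             return f"({prev}, {boundary}]"
--         prev = boundary
--     return None
-- ===== SOURCE B (Python) =====
-- BIN_BOUNDARIES = [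
--     4096,
--     8192,
--     16384,
--     32768,
--     65536,
--     131072,
--     262144,
--     524288,
--     1048576,
-- ]
--
-- def resolve_bin(token_count: int) -> str:
--     # binary search (bisect_left) for the first boundary >= token_count
--     lo, hi = 0, len(BIN_BOUNDARIES)
--     while lo < hi:
--         mid = (lo + hi) // 2
--         if BIN_BOUNDARIES[mid] < token_count:
--             lo = mid + 1
--         else:
--             hi = mid
--     if lo == len(BIN_BOUNDARIES):
--         return None
--     prev = BIN_BOUNDARIES[lo - 1] if lo > 0 else 0
--     return f"({prev}, {BIN_BOUNDARIES[lo]}]"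
-- ===== Notes on version B (the rewrite author's own statement) =====
-- stated objective: idiomatic
-- what changed: Replaces the linear scan with carried prev by a bisect_left-style binary search over the sorted boundary table followed by one direct index/format step.
import Mathlib
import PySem

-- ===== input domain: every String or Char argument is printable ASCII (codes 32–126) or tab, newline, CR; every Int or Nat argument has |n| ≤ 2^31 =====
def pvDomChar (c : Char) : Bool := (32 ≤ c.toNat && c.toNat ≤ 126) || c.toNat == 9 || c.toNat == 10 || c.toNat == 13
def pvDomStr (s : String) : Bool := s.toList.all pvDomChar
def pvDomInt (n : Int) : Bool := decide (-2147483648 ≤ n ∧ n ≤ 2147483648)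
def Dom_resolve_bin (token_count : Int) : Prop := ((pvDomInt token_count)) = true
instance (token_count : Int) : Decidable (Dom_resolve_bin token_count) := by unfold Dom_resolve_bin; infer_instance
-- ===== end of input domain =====

-- B replaces A's linear scan by a bisect_left-style binary search over the boundary table (idiomatic; same result).

-- ===== PORT A =====
def BIN_BOUNDARIES : List Int :=
  [4096, 8192, 16384, 32768, 65536, 131072, 262144, 524288, 1048576]

-- A's for-loop with early return, carrying prev
def resolveLoopA (t : Int) : List Int → Int → Option String
  | [], _ => none
  | b :: rest, prev =>
    if t ≤ b then
      if prev = 0 then some ("(0, " ++ PySem.Int.toStr b ++ "]")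
      else some ("(" ++ PySem.Int.toStr prev ++ ", " ++ PySem.Int.toStr b ++ "]")
    else resolveLoopA t rest b

def resolve_bin (token_count : Int) : Option String :=
  resolveLoopA token_count BIN_BOUNDARIES 0

-- ===== PORT B =====
-- Source B's hand-written bisect_left while-loop (indices always in range, so getD is exact)
def bisectLoopB (t : Int) (lo hi : Nat) : Nat :=
  if _h : lo < hi then
    let mid := (lo + hi) / 2
    if BIN_BOUNDARIES.getD mid 0 < t then bisectLoopB t (mid + 1) hi
    else bisectLoopB t lo mid
  else lo
termination_by hi - lo
decreasing_by all_goals omega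

def resolve_bin_alt (token_count : Int) : Option String :=
  let lo := bisectLoopB token_count 0 BIN_BOUNDARIES.length
  if lo = BIN_BOUNDARIES.length then none
  else
    let prev : Int := if lo > 0 then BIN_BOUNDARIES.getD (lo - 1) 0 else 0
    some ("(" ++ PySem.Int.toStr prev ++ ", " ++ PySem.Int.toStr (BIN_BOUNDARIES.getD lo 0) ++ "]")

-- ===== PRECONDITION & SPEC =====
def Spec_resolve_bin (token_count : Int) (out : Option String) : Prop := out = resolve_bin_alt token_count
instance (token_count : Int) (out : Option String) : Decidable (Spec_resolve_bin token_count out) := by unfold Spec_resolve_bin; infer_instance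

-- ===== CLAIM (what is proved, stated in full; the proofs are below) =====
def Claim_equal_resolve_bin : Prop := ∀ (token_count : Int), Dom_resolve_bin token_count → Spec_resolve_bin token_count (resolve_bin token_count)

-- ===== LEMMAS AND PROOFS =====
lemma bstep (t : Int) (lo hi : Nat) (h : lo < hi) :
    bisectLoopB t lo hi =
      if BIN_BOUNDARIES.getD ((lo + hi) / 2) 0 < t then bisectLoopB t ((lo + hi) / 2 + 1) hi
      else bisectLoopB t lo ((lo + hi) / 2) := by
  rw [bisectLoopB]; simp [h]

lemma bend (t : Int) (lo : Nat) : bisectLoopB t lo lo = lo := by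
  rw [bisectLoopB]; simp

lemma bis0 (t : Int) (h1 : t ≤ 4096) : bisectLoopB t 0 9 = 0 := by
  rw [bstep t 0 9 (by norm_num)]
  norm_num [BIN_BOUNDARIES, if_neg (by omega : ¬ (65536:Int) < t)]
  rw [bstep t 0 4 (by norm_num)]
  norm_num [BIN_BOUNDARIES, if_neg (by omega : ¬ (16384:Int) < t)]
  rw [bstep t 0 2 (by norm_num)]
  norm_num [BIN_BOUNDARIES, if_neg (by omega : ¬ (8192:Int) < t)]
  rw [bstep t 0 1 (by norm_num)]
  norm_num [BIN_BOUNDARIES, if_neg (by omega : ¬ (4096:Int) < t)]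
  exact bend t 0

lemma bis1 (t : Int) (hlo : ¬ t ≤ 4096) (hhi : t ≤ 8192) : bisectLoopB t 0 9 = 1 := by
  rw [bstep t 0 9 (by norm_num)]
  norm_num [BIN_BOUNDARIES, if_neg (by omega : ¬ (65536:Int) < t)]
  rw [bstep t 0 4 (by norm_num)]
  norm_num [BIN_BOUNDARIES, if_neg (by omega : ¬ (16384:Int) < t)]
  rw [bstep t 0 2 (by norm_num)]
  norm_num [BIN_BOUNDARIES, if_neg (by omega : ¬ (8192:Int) < t)]
  rw [bstep t 0 1 (by norm_num)]
  norm_num [BIN_BOUNDARIES, if_pos (by omega : (4096:Int) < t)]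
  exact bend t 1

lemma bis2 (t : Int) (hlo : ¬ t ≤ 8192) (hhi : t ≤ 16384) : bisectLoopB t 0 9 = 2 := by
  rw [bstep t 0 9 (by norm_num)]
  norm_num [BIN_BOUNDARIES, if_neg (by omega : ¬ (65536:Int) < t)]
  rw [bstep t 0 4 (by norm_num)]
  norm_num [BIN_BOUNDARIES, if_neg (by omega : ¬ (16384:Int) < t)]
  rw [bstep t 0 2 (by norm_num)]
  norm_num [BIN_BOUNDARIES, if_pos (by omega : (8192:Int) < t)]
  exact bend t 2

lemma bis3 (t : Int) (hlo : ¬ t ≤ 16384) (hhi : t ≤ 32768) : bisectLoopB t 0 9 = 3 := by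
  rw [bstep t 0 9 (by norm_num)]
  norm_num [BIN_BOUNDARIES, if_neg (by omega : ¬ (65536:Int) < t)]
  rw [bstep t 0 4 (by norm_num)]
  norm_num [BIN_BOUNDARIES, if_pos (by omega : (16384:Int) < t)]
  rw [bstep t 3 4 (by norm_num)]
  norm_num [BIN_BOUNDARIES, if_neg (by omega : ¬ (32768:Int) < t)]
  exact bend t 3

lemma bis4 (t : Int) (hlo : ¬ t ≤ 32768) (hhi : t ≤ 65536) : bisectLoopB t 0 9 = 4 := by
  rw [bstep t 0 9 (by norm_num)]
  norm_num [BIN_BOUNDARIES, if_neg (by omega : ¬ (65536:Int) < t)]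
  rw [bstep t 0 4 (by norm_num)]
  norm_num [BIN_BOUNDARIES, if_pos (by omega : (16384:Int) < t)]
  rw [bstep t 3 4 (by norm_num)]
  norm_num [BIN_BOUNDARIES, if_pos (by omega : (32768:Int) < t)]
  exact bend t 4

lemma bis5 (t : Int) (hlo : ¬ t ≤ 65536) (hhi : t ≤ 131072) : bisectLoopB t 0 9 = 5 := by
  rw [bstep t 0 9 (by norm_num)]
  norm_num [BIN_BOUNDARIES, if_pos (by omega : (65536:Int) < t)]
  rw [bstep t 5 9 (by norm_num)]
  norm_num [BIN_BOUNDARIES, if_neg (by omega : ¬ (524288:Int) < t)]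
  rw [bstep t 5 7 (by norm_num)]
  norm_num [BIN_BOUNDARIES, if_neg (by omega : ¬ (262144:Int) < t)]
  rw [bstep t 5 6 (by norm_num)]
  norm_num [BIN_BOUNDARIES, if_neg (by omega : ¬ (131072:Int) < t)]
  exact bend t 5

lemma bis6 (t : Int) (hlo : ¬ t ≤ 131072) (hhi : t ≤ 262144) : bisectLoopB t 0 9 = 6 := by
  rw [bstep t 0 9 (by norm_num)]
  norm_num [BIN_BOUNDARIES, if_pos (by omega : (65536:Int) < t)]
  rw [bstep t 5 9 (by norm_num)]
  norm_num [BIN_BOUNDARIES, if_neg (by omega : ¬ (524288:Int) < t)]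
  rw [bstep t 5 7 (by norm_num)]
  norm_num [BIN_BOUNDARIES, if_neg (by omega : ¬ (262144:Int) < t)]
  rw [bstep t 5 6 (by norm_num)]
  norm_num [BIN_BOUNDARIES, if_pos (by omega : (131072:Int) < t)]
  exact bend t 6

lemma bis7 (t : Int) (hlo : ¬ t ≤ 262144) (hhi : t ≤ 524288) : bisectLoopB t 0 9 = 7 := by
  rw [bstep t 0 9 (by norm_num)]
  norm_num [BIN_BOUNDARIES, if_pos (by omega : (65536:Int) < t)]
  rw [bstep t 5 9 (by norm_num)]
  norm_num [BIN_BOUNDARIES, if_neg (by omega : ¬ (524288:Int) < t)]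
  rw [bstep t 5 7 (by norm_num)]
  norm_num [BIN_BOUNDARIES, if_pos (by omega : (262144:Int) < t)]
  exact bend t 7

lemma bis8 (t : Int) (hlo : ¬ t ≤ 524288) (hhi : t ≤ 1048576) : bisectLoopB t 0 9 = 8 := by
  rw [bstep t 0 9 (by norm_num)]
  norm_num [BIN_BOUNDARIES, if_pos (by omega : (65536:Int) < t)]
  rw [bstep t 5 9 (by norm_num)]
  norm_num [BIN_BOUNDARIES, if_pos (by omega : (524288:Int) < t)]
  rw [bstep t 8 9 (by norm_num)]
  norm_num [BIN_BOUNDARIES, if_neg (by omega : ¬ (1048576:Int) < t)]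
  exact bend t 8

lemma bis9 (t : Int) (hlo : ¬ t ≤ 1048576) : bisectLoopB t 0 9 = 9 := by
  rw [bstep t 0 9 (by norm_num)]
  norm_num [BIN_BOUNDARIES, if_pos (by omega : (65536:Int) < t)]
  rw [bstep t 5 9 (by norm_num)]
  norm_num [BIN_BOUNDARIES, if_pos (by omega : (524288:Int) < t)]
  rw [bstep t 8 9 (by norm_num)]
  norm_num [BIN_BOUNDARIES, if_pos (by omega : (1048576:Int) < t)]
  exact bend t 9

-- ===== VERDICT (by name: the statement is the Claim_ definition above) =====
set_option maxRecDepth 4096 in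
theorem resolve_bin_spec : Claim_equal_resolve_bin := by
  intro t _
  unfold Spec_resolve_bin resolve_bin resolve_bin_alt
  by_cases h1 : t ≤ 4096 <;> by_cases h2 : t ≤ 8192 <;> by_cases h3 : t ≤ 16384 <;>
    by_cases h4 : t ≤ 32768 <;> by_cases h5 : t ≤ 65536 <;> by_cases h6 : t ≤ 131072 <;>
    by_cases h7 : t ≤ 262144 <;> by_cases h8 : t ≤ 524288 <;> by_cases h9 : t ≤ 1048576 <;>
    first
      | omega
      | (simp only [show BIN_BOUNDARIES.length = 9 from rfl]; rw [bis0 t h1]; simp [resolveLoopA, BIN_BOUNDARIES, h1, h2, h3, h4, h5, h6, h7, h8, h9]; try decide)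
      | (simp only [show BIN_BOUNDARIES.length = 9 from rfl]; rw [bis1 t h1 h2]; simp [resolveLoopA, BIN_BOUNDARIES, h1, h2, h3, h4, h5, h6, h7, h8, h9]; try decide)
      | (simp only [show BIN_BOUNDARIES.length = 9 from rfl]; rw [bis2 t h2 h3]; simp [resolveLoopA, BIN_BOUNDARIES, h1, h2, h3, h4, h5, h6, h7, h8, h9]; try decide)
      | (simp only [show BIN_BOUNDARIES.length = 9 from rfl]; rw [bis3 t h3 h4]; simp [resolveLoopA, BIN_BOUNDARIES, h1, h2, h3, h4, h5, h6, h7, h8, h9]; try decide)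
      | (simp only [show BIN_BOUNDARIES.length = 9 from rfl]; rw [bis4 t h4 h5]; simp [resolveLoopA, BIN_BOUNDARIES, h1, h2, h3, h4, h5, h6, h7, h8, h9]; try decide)
      | (simp only [show BIN_BOUNDARIES.length = 9 from rfl]; rw [bis5 t h5 h6]; simp [resolveLoopA, BIN_BOUNDARIES, h1, h2, h3, h4, h5, h6, h7, h8, h9]; try decide)
      | (simp only [show BIN_BOUNDARIES.length = 9 from rfl]; rw [bis6 t h6 h7]; simp [resolveLoopA, BIN_BOUNDARIES, h1, h2, h3, h4, h5, h6, h7, h8, h9]; try decide)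
      | (simp only [show BIN_BOUNDARIES.length = 9 from rfl]; rw [bis7 t h7 h8]; simp [resolveLoopA, BIN_BOUNDARIES, h1, h2, h3, h4, h5, h6, h7, h8, h9]; try decide)
      | (simp only [show BIN_BOUNDARIES.length = 9 from rfl]; rw [bis8 t h8 h9]; simp [resolveLoopA, BIN_BOUNDARIES, h1, h2, h3, h4, h5, h6, h7, h8, h9]; try decide)
      | (simp only [show BIN_BOUNDARIES.length = 9 from rfl]; rw [bis9 t h9]; simp [resolveLoopA, BIN_BOUNDARIES, h1, h2, h3, h4, h5, h6, h7, h8, h9]; try decide)
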